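-- pv_equiv track=rewrite | github.com/Ankitha8105/Python_DataType | List_prgms/14_CircularlyIdentical.py | check_circularly_identical
-- ===== SOURCE A (Python) =====
-- def check_circularly_identical(list1, list2):
--     """
--     Description :
--         This function is used to check whether two lists are circularly identical
--     Parameters :
--         list1 =First List items
--         list2 = Second list items
--     Return :
--         It returns two lists are circularly identical or not
--     """
--
--     if len(list1) != len(list2):
--         return "Not Identical"
--
--
--     double_list = list1 + list1
--
--
--     if any(double_list[i:i+len(list2)] == list2 for i in range(len(list1))):
--         return "Identical"
--     else:
--         return "Not Identical"
-- ===== SOURCE B (Python) =====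
-- def check_circularly_identical(list1, list2):
--     if len(list1) != len(list2):
--         return "Not Identical"
--     cur = list2
--     for _ in range(len(list2)):
--         if cur == list1:
--             return "Identical"
--         cur = cur[1:] + cur[:1]
--     return "Not Identical"
-- ===== Notes on version B (the rewrite author's own statement) =====
-- stated objective: alternative
-- what changed: B never builds the doubled list or slices windows out of it: it rotates list2 one step at a time (cur = cur[1:]+cur[:1]) and compares each rotation directly against list1, returning early on the first match.
import Mathlib
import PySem

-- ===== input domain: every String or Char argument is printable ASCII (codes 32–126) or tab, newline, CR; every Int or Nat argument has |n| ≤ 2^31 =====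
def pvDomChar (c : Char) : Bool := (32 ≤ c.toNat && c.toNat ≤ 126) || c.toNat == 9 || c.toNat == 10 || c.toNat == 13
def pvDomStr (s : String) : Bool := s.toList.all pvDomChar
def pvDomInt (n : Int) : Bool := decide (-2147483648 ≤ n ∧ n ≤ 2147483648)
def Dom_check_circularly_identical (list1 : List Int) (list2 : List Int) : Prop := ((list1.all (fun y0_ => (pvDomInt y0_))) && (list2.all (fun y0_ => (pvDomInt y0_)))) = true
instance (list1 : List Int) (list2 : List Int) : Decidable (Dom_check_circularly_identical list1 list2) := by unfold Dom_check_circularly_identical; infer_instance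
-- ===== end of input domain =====

-- B replaces A's doubled-list window scan by stepwise rotation of list2 compared against list1
-- (alternative decomposition, same asymptotic cost).

-- ===== PORT A =====
def check_circularly_identical (list1 : List Int) (list2 : List Int) : String :=
  if (list1.length : Int) ≠ (list2.length : Int) then "Not Identical"
  else
    let double_list := list1 ++ list1
    if (PySem.List.pyRange 0 (list1.length : Int) 1).any
        (fun i => PySem.List.slice double_list (some i) (some (i + (list2.length : Int))) == list2)
    then "Identical" else "Not Identical"

-- ===== PORT B =====
-- the 'for _ in range(len(list2))' loop of Source B, with 'cur' as the accumulator
def rotCheck (list1 : List Int) : List Int → Nat → Bool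
  | _, 0 => false
  | cur, k+1 => if cur == list1 then true else rotCheck list1 (cur.drop 1 ++ cur.take 1) k

def check_circularly_identical_alt (list1 : List Int) (list2 : List Int) : String :=
  if (list1.length : Int) ≠ (list2.length : Int) then "Not Identical"
  else if rotCheck list1 list2 list2.length then "Identical" else "Not Identical"

-- ===== PRECONDITION & SPEC =====
def Spec_check_circularly_identical (list1 : List Int) (list2 : List Int) (out : String) : Prop := out = check_circularly_identical_alt list1 list2
instance (list1 : List Int) (list2 : List Int) (out : String) : Decidable (Spec_check_circularly_identical list1 list2 out) := by unfold Spec_check_circularly_identical; infer_instance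

-- ===== CLAIM (what is proved, stated in full; the proofs are below) =====
def Claim_equal_check_circularly_identical : Prop := ∀ (list1 : List Int) (list2 : List Int), Dom_check_circularly_identical list1 list2 → Spec_check_circularly_identical list1 list2 (check_circularly_identical list1 list2)

-- ===== LEMMAS AND PROOFS =====

-- one rotation step of Source B's loop is List.rotate by 1
theorem drop_append_take_one (l : List Int) : l.drop 1 ++ l.take 1 = l.rotate 1 := by
  cases l with
  | nil => simp
  | cons a t =>
    rw [List.rotate_eq_drop_append_take (by simp)]

-- characterisation of the loop
theorem rotCheck_iff (list1 cur : List Int) (k : Nat) :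
    rotCheck list1 cur k = true ↔ ∃ j < k, cur.rotate j = list1 := by
  induction k generalizing cur with
  | zero => simp [rotCheck]
  | succ k ih =>
    rw [rotCheck]
    by_cases h : cur = list1
    · subst h
      simp only [beq_self_eq_true, if_true, true_iff]
      exact ⟨0, Nat.succ_pos _, by simp⟩
    · rw [if_neg (by simp [h])]
      rw [ih, drop_append_take_one]
      constructor
      · rintro ⟨j, hj, hrot⟩
        exact ⟨j + 1, by omega, by rwa [List.rotate_rotate, Nat.add_comm] at hrot⟩
      · rintro ⟨j, hj, hrot⟩
        cases j with
        | zero => simp at hrot; exact absurd hrot h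
        | succ j =>
          refine ⟨j, by omega, ?_⟩
          rw [List.rotate_rotate, Nat.add_comm]
          simpa using hrot

-- a length-n window of the doubled list is a rotation of list1
theorem slice_double_eq_rotate (l : List Int) (i : Nat) (hi : i < l.length) :
    PySem.List.slice (l ++ l) (some (i : Int)) (some ((i : Int) + (l.length : Int))) = l.rotate i := by
  rw [PySem.List.slice_natCast_add]
  rw [List.drop_append_of_le_length (by omega)]
  rw [List.rotate_eq_drop_append_take (by omega)]
  rw [List.take_append]
  congr 1
  · exact List.take_of_length_le (by simp)
  · congr 1
    simp
    omega

-- existence of a matching rotation is symmetric between the two lists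
theorem exists_rotate_comm (l1 l2 : List Int) (h : l1.length = l2.length) :
    (∃ i < l1.length, l1.rotate i = l2) → ∃ j < l2.length, l2.rotate j = l1 := by
  rintro ⟨i, hi, hrot⟩
  have hn : 0 < l1.length := Nat.lt_of_le_of_lt (Nat.zero_le _) hi
  refine ⟨(l1.length - i) % l1.length, by rw [← h]; exact Nat.mod_lt _ hn, ?_⟩
  subst hrot
  rw [List.rotate_rotate]
  rcases Nat.eq_zero_or_pos i with h0 | hpos
  · subst h0; simp
  · rw [Nat.mod_eq_of_lt (by omega)]
    have : i + (l1.length - i) = l1.length := by omega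
    rw [this, List.rotate_length]

-- A's any-over-range test, as an existential
theorem anyA_iff (l1 l2 : List Int) :
    ((PySem.List.pyRange 0 (l1.length : Int) 1).any
      (fun i => PySem.List.slice (l1 ++ l1) (some i) (some (i + (l2.length : Int))) == l2)) = true
    ↔ ∃ i < l1.length, PySem.List.slice (l1 ++ l1) (some (i : Int)) (some ((i : Int) + (l2.length : Int))) = l2 := by
  rw [List.any_eq_true]
  constructor
  · rintro ⟨x, hx, hp⟩
    rw [PySem.List.mem_pyRange_one] at hx
    obtain ⟨hx0, hxn⟩ := hx
    refine ⟨x.toNat, by omega, ?_⟩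
    have : ((x.toNat : Int)) = x := Int.toNat_of_nonneg hx0
    rw [this]
    exact beq_iff_eq.mp hp
  · rintro ⟨i, hi, hp⟩
    refine ⟨(i : Int), ?_, beq_iff_eq.mpr hp⟩
    rw [PySem.List.mem_pyRange_one]
    constructor <;> omega

-- ===== VERDICT (by name: the statement is the Claim_ definition above) =====
theorem check_circularly_identical_spec : Claim_equal_check_circularly_identical := by
  intro l1 l2 _
  unfold Spec_check_circularly_identical check_circularly_identical check_circularly_identical_alt
  by_cases hlen : (l1.length : Int) = (l2.length : Int)
  · have hL : l1.length = l2.length := by exact_mod_cast hlen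
    rw [if_neg (not_not_intro hlen), if_neg (not_not_intro hlen)]
    have key : ((PySem.List.pyRange 0 (l1.length : Int) 1).any
        (fun i => PySem.List.slice (l1 ++ l1) (some i) (some (i + (l2.length : Int))) == l2)) = rotCheck l1 l2 l2.length := by
      have hcast : ((l2.length : Int)) = ((l1.length : Int)) := by rw [hL]
      rcases Bool.eq_false_or_eq_true (rotCheck l1 l2 l2.length) with hB | hB
      · rw [hB, anyA_iff]
        rw [rotCheck_iff] at hB
        obtain ⟨j, hj, hrot⟩ := hB
        obtain ⟨i, hi, hrot'⟩ := exists_rotate_comm l2 l1 hL.symm ⟨j, hj, hrot⟩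
        have hi1 : i < l1.length := by omega
        exact ⟨i, hi1, by rw [hcast, slice_double_eq_rotate l1 i hi1]; exact hrot'⟩
      · rw [hB, Bool.eq_false_iff]
        intro hA
        rw [anyA_iff] at hA
        obtain ⟨i, hi, hsl⟩ := hA
        rw [hcast, slice_double_eq_rotate l1 i hi] at hsl
        have := exists_rotate_comm l1 l2 hL ⟨i, hi, hsl⟩
        rw [← rotCheck_iff] at this
        rw [hB] at this
        exact Bool.false_ne_true this
    show (if ((PySem.List.pyRange 0 (l1.length : Int) 1).any
        (fun i => PySem.List.slice (l1 ++ l1) (some i) (some (i + (l2.length : Int))) == l2)) = true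
      then "Identical" else "Not Identical")
      = (if rotCheck l1 l2 l2.length = true then "Identical" else "Not Identical")
    rw [key]
  · simp [hlen]
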